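-- pv_equiv track=rewrite | github.com/Sosohy/algorithm_study | 프로그래머스/lv2/17687. ［3차］ n진수 게임/［3차］ n진수 게임.py | getNtext
-- ===== SOURCE A (Python) =====
-- def getNtext(n, end):
--     numText= "0"
--     idx = 1
--     dic = {10 : 'A', 11: "B", 12: 'C', 13: 'D', 14:'E', 15: 'F'}
--
--     while len(numText) <= end:
--         tmp = ''
--         tIdx = idx
--         while(tIdx > 0):
--             if(tIdx%n >= 10):
--                 tmp += dic[tIdx%n]
--             else:
--                 tmp += str(tIdx%n)
--             tIdx = tIdx//n
--         numText += tmp[::-1]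
--         idx += 1
--
--     return numText
-- ===== SOURCE B (Python) =====
-- def getNtext(n, end):
--     # Incremental odometer: keep the current number's base-n digits (least-significant
--     # first) and increment them with carry, instead of re-converting each integer by
--     # repeated division. Pieces are collected in a list and joined once.
--     alphabet = {10: 'A', 11: 'B', 12: 'C', 13: 'D', 14: 'E', 15: 'F'}
--     text = ["0"]
--     length = 1
--     digits = [0]
--     while length <= end:
--         i = 0
--         while True:
--             digits[i] += 1
--             if digits[i] < n:
--                 break
--             digits[i] = 0
--             i += 1
--             if i == len(digits):
--                 digits.append(0)
--         piece = ''.join(alphabet[d] if d >= 10 else str(d) for d in reversed(digits))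
--         text.append(piece)
--         length += len(piece)
--     return ''.join(text)
-- ===== Notes on version B (the rewrite author's own statement) =====
-- stated objective: alternative
-- what changed: B replaces A's per-number base conversion by repeated division with an incremental base-n odometer: a least-significant-first digit list incremented in place with carry each step and rendered once, with the pieces collected in a list and joined at the end.
-- outside the precondition, e.g. on getNtext(-3, 4): A returns '02-1-', B does not finish within the time limit
import Mathlib
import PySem

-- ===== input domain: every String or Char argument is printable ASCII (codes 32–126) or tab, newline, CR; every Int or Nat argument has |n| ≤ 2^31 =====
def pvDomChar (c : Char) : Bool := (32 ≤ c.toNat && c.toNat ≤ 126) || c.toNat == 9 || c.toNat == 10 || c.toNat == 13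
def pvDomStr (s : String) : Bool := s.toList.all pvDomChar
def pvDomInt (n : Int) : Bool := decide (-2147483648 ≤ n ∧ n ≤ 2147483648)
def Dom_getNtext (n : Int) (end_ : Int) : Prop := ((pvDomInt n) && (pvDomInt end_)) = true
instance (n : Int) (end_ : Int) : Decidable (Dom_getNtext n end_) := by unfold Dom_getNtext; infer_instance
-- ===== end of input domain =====

-- B replaces A's per-number repeated-division conversion by an incremental base-n
-- odometer (digit list incremented with carry) rendered once per step; alternative
-- decomposition, same asymptotic cost.

-- ===== PORT A =====
def pvDicA : PySem.Dict Int String :=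
  PySem.Dict.ofList [(10, "A"), (11, "B"), (12, "C"), (13, "D"), (14, "E"), (15, "F")]

-- inner while(tIdx > 0) loop of A; fuel tIdx.toNat suffices whenever the Python loop
-- terminates (tIdx strictly decreases for n ≥ 2)
def pvConvA (n : Int) : Nat → Int → List Char → List Char
  | 0, _, tmp => tmp
  | fuel+1, tIdx, tmp =>
    if tIdx > 0 then
      let d := PySem.Int.mod tIdx n
      let tmp' := tmp ++ (if d ≥ 10 then (pvDicA.getD d "").toList else PySem.Int.toChars d)
      pvConvA n fuel (PySem.Int.floordiv tIdx n) tmp'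
    else tmp

-- outer while len(numText) <= end loop; each pass appends ≥ 1 char on the admitted
-- inputs, so fuel (end_+1).toNat suffices
def pvLoopA (n end_ : Int) : Nat → List Char → Int → List Char
  | 0, numText, _ => numText
  | fuel+1, numText, idx =>
    if (numText.length : Int) ≤ end_ then
      let tmp := pvConvA n idx.toNat idx []
      pvLoopA n end_ fuel (numText ++ tmp.reverse) (idx + 1)
    else numText

def getNtext (n : Int) (end_ : Int) : String :=
  String.ofList (pvLoopA n end_ (end_ + 1).toNat ['0'] 1)

-- ===== PORT B =====
def pvAlphaB : PySem.Dict Int String :=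
  PySem.Dict.ofList [(10, "A"), (11, "B"), (12, "C"), (13, "D"), (14, "E"), (15, "F")]

-- B's inner carry loop: increment the least-significant-first digit list
def pvBump (n : Int) : List Int → List Int
  | [] => [1]
  | d :: ds => if d + 1 < n then (d + 1) :: ds else 0 :: pvBump n ds

def pvDigB (d : Int) : List Char :=
  if d ≥ 10 then (pvAlphaB.getD d "").toList else PySem.Int.toChars d

-- ''.join(... for d in reversed(digits))
def pvRenderB (digits : List Int) : List Char :=
  (digits.reverse.map pvDigB).flatten

def pvLoopB (n end_ : Int) : Nat → List (List Char) → Int → List Int → List (List Char)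
  | 0, text, _, _ => text
  | fuel+1, text, length, digits =>
    if length ≤ end_ then
      let digits' := pvBump n digits
      let piece := pvRenderB digits'
      pvLoopB n end_ fuel (text ++ [piece]) (length + piece.length) digits'
    else text

def getNtext_alt (n : Int) (end_ : Int) : String :=
  String.ofList (pvLoopB n end_ (end_ + 1).toNat [['0']] 1 [0]).flatten

-- ===== PRECONDITION & SPEC =====
-- Pre_ is exactly where A returns normally: bases 2..16 (any end), bases > 16 as long
-- as end_ ≤ 15 so the loop stops before the digit 16 appears, and every input with
-- end_ < 1, where the loop never runs and both programs return "0". Outside, A raises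
-- ZeroDivisionError (n = 0, end ≥ 1), KeyError (n > 16 once end ≥ 16 forces the digit
-- 16), diverges (n = 1, end ≥ 1), or — for negative n with end ≥ 1 — returns reversed
-- str(negative-remainder) garbage on which B's odometer diverges.
def Pre_getNtext (n : Int) (end_ : Int) : Prop :=
  (2 ≤ n ∧ (n ≤ 16 ∨ end_ ≤ 15)) ∨ end_ < 1
instance (n : Int) (end_ : Int) : Decidable (Pre_getNtext n end_) := by
  unfold Pre_getNtext; infer_instance

def pvWitness_getNtext : Int × Int := (16, 40)

def Spec_getNtext (n : Int) (end_ : Int) (out : String) : Prop := out = getNtext_alt n end_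
instance (n : Int) (end_ : Int) (out : String) : Decidable (Spec_getNtext n end_ out) := by
  unfold Spec_getNtext; infer_instance

-- ===== CLAIM (what is proved, stated in full; the proofs are below) =====
def Claim_equal_getNtext : Prop :=
  ∀ (n : Int) (end_ : Int), Dom_getNtext n end_ → Pre_getNtext n end_ →
    Spec_getNtext n end_ (getNtext n end_)

-- ===== LEMMAS AND PROOFS =====

theorem pvEdivLt (k n : Int) (hk : 0 < k) (h2 : 2 ≤ n) : k / n < k := by
  have hq0 : 0 ≤ k / n := Int.ediv_nonneg (by omega) (by omega)
  have hkey : n * (k / n) + k % n = k := Int.mul_ediv_add_emod k n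
  have h1 : 2 * (k / n) ≤ n * (k / n) := by
    exact mul_le_mul_of_nonneg_right h2 hq0
  have h2' : 0 ≤ k % n := Int.emod_nonneg k (by omega)
  omega

-- least-significant-first base-n digits of k, computed exactly as A's inner loop does
def pvLs (n : Int) : Nat → Int → List Int
  | 0, _ => []
  | fuel+1, k =>
    if k > 0 then PySem.Int.mod k n :: pvLs n fuel (PySem.Int.floordiv k n) else []

def pvLsC (n k : Int) : List Int := pvLs n k.toNat k

theorem pvConvA_eq (n : Int) :
    ∀ (fuel : Nat) (k : Int) (tmp : List Char),
      pvConvA n fuel k tmp =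
        tmp ++ (pvLs n fuel k).flatMap
          (fun d => if d ≥ 10 then (pvDicA.getD d "").toList else PySem.Int.toChars d) := by
  intro fuel
  induction fuel with
  | zero => intro k tmp; simp [pvConvA, pvLs]
  | succ f ih =>
    intro k tmp
    by_cases hk : k > 0
    · simp only [pvConvA, pvLs, if_pos hk, ih]
      simp
    · simp [pvConvA, pvLs, hk]

theorem pvLs_fuel (n : Int) (h2 : 2 ≤ n) :
    ∀ (fuel fuel' : Nat) (k : Int), k.toNat ≤ fuel → k.toNat ≤ fuel' →
      pvLs n fuel k = pvLs n fuel' k := by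
  intro fuel
  induction fuel with
  | zero =>
    intro fuel' k h h'
    have hk : ¬ k > 0 := by omega
    cases fuel' with
    | zero => rfl
    | succ f' => simp [pvLs, hk]
  | succ f ih =>
    intro fuel' k h h'
    by_cases hk : k > 0
    · cases fuel' with
      | zero => omega
      | succ f' =>
        have hdiv : PySem.Int.floordiv k n = k / n := PySem.Int.floordiv_eq_ediv_of_pos (by omega)
        have hlt : k / n < k := pvEdivLt k n hk h2
        have hnn : 0 ≤ k / n := Int.ediv_nonneg (by omega) (by omega)
        simp only [pvLs, if_pos hk, hdiv]
        rw [ih f' (k / n) (by omega) (by omega)]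
    · cases fuel' with
      | zero => simp [pvLs, hk]
      | succ f' => simp [pvLs, hk]

theorem pvLsC_pos (n k : Int) (h2 : 2 ≤ n) (hk : 0 < k) :
    pvLsC n k = PySem.Int.mod k n :: pvLsC n (PySem.Int.floordiv k n) := by
  have hdiv : PySem.Int.floordiv k n = k / n := PySem.Int.floordiv_eq_ediv_of_pos (by omega)
  have hlt : k / n < k := pvEdivLt k n hk h2
  have hnn : 0 ≤ k / n := Int.ediv_nonneg (by omega) (by omega)
  obtain ⟨m, hm⟩ : ∃ m, k.toNat = m + 1 := ⟨k.toNat - 1, by omega⟩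
  unfold pvLsC
  rw [hm]
  simp only [pvLs, if_pos hk, hdiv]
  rw [pvLs_fuel n h2 m (k / n).toNat (k / n) (by omega) (by omega)]

theorem mem_pvLs (n : Int) (h2 : 2 ≤ n) :
    ∀ (fuel : Nat) (k d : Int), d ∈ pvLs n fuel k → 0 ≤ d ∧ d < n := by
  intro fuel
  induction fuel with
  | zero => intro k d hd; simp [pvLs] at hd
  | succ f ih =>
    intro k d hd
    by_cases hk : k > 0
    · simp only [pvLs, if_pos hk, List.mem_cons] at hd
      rcases hd with h | h
      · subst h
        exact ⟨PySem.Int.mod_nonneg _ (by omega), PySem.Int.mod_lt _ (by omega)⟩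
      · exact ih _ d h
    · simp [pvLs, hk] at hd

-- for 0 < k < n the number is a single digit
theorem pvLsC_single (n k : Int) (h2 : 2 ≤ n) (hk : 0 < k) (hkn : k < n) :
    pvLsC n k = [k] := by
  have hmod : PySem.Int.mod k n = k := by
    rw [PySem.Int.mod_eq_emod_of_pos (by omega)]
    exact Int.emod_eq_of_lt (by omega) hkn
  have hdiv : PySem.Int.floordiv k n = 0 := by
    rw [PySem.Int.floordiv_eq_ediv_of_pos (by omega)]
    exact Int.ediv_eq_zero_of_lt (by omega) hkn
  rw [pvLsC_pos n k h2 hk, hmod, hdiv]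
  simp [pvLsC, pvLs]

-- the odometer step: bumping the digits of k gives the digits of k+1
theorem pvBump_pvLsC (n : Int) (h2 : 2 ≤ n) :
    ∀ (m : Nat) (k : Int), 0 ≤ k → k.toNat ≤ m → pvBump n (pvLsC n k) = pvLsC n (k + 1) := by
  intro m
  induction m with
  | zero =>
    intro k hk0 hkm
    have hk : k = 0 := by omega
    subst hk
    have h1 : pvLsC n 0 = [] := by simp [pvLsC, pvLs]
    have h2' : pvLsC n 1 = [1] := pvLsC_single n 1 h2 (by omega) (by omega)
    rw [show (0:Int) + 1 = 1 by norm_num, h1, h2']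
    simp [pvBump]
  | succ m ih =>
    intro k hk0 hkm
    by_cases hk : k = 0
    · exact ih k hk0 (by omega)
    have hkpos : 0 < k := by omega
    have hmod : PySem.Int.mod k n = k % n := PySem.Int.mod_eq_emod_of_pos (by omega)
    have hdiv : PySem.Int.floordiv k n = k / n := PySem.Int.floordiv_eq_ediv_of_pos (by omega)
    have hr0 : 0 ≤ k % n := Int.emod_nonneg k (by omega)
    have hrn : k % n < n := Int.emod_lt_of_pos k (by omega)
    have hqk : k / n < k := pvEdivLt k n hkpos h2
    have hq0 : 0 ≤ k / n := Int.ediv_nonneg (by omega) (by omega)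
    have hkey : k = n * (k / n) + k % n := (Int.mul_ediv_add_emod k n).symm
    rw [pvLsC_pos n k h2 hkpos, hmod, hdiv]
    by_cases hcar : k % n + 1 < n
    · -- no carry
      have hsplit : k + 1 = (k % n + 1) + (k / n) * n := by rw [mul_comm]; omega
      have hq' : (k + 1) / n = k / n := by
        rw [hsplit, Int.add_mul_ediv_right _ _ (show n ≠ 0 by omega),
          Int.ediv_eq_zero_of_lt (by omega) hcar]
        omega
      have hr' : (k + 1) % n = k % n + 1 := by
        rw [hsplit, Int.add_mul_emod_self_right, Int.emod_eq_of_lt (by omega) hcar]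
      simp only [pvBump, if_pos hcar]
      rw [pvLsC_pos n (k + 1) h2 (by omega),
          PySem.Int.mod_eq_emod_of_pos (a := k + 1) (by omega),
          PySem.Int.floordiv_eq_ediv_of_pos (a := k + 1) (by omega), hq', hr']
    · -- carry: k % n = n - 1
      have hrn1 : k % n = n - 1 := by omega
      have hq' : (k + 1) / n = k / n + 1 := by
        have h1 : k + 1 = n * (k / n + 1) := by rw [mul_add, mul_one]; omega
        rw [h1, Int.mul_ediv_cancel_left _ (by omega)]
      have hr' : (k + 1) % n = 0 := by
        have h1 : k + 1 = n * (k / n + 1) := by rw [mul_add, mul_one]; omega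
        rw [h1, Int.mul_emod_right]
      simp only [pvBump, if_neg hcar]
      rw [pvLsC_pos n (k + 1) h2 (by omega),
          PySem.Int.mod_eq_emod_of_pos (a := k + 1) (by omega),
          PySem.Int.floordiv_eq_ediv_of_pos (a := k + 1) (by omega), hq', hr',
          ih (k / n) hq0 (by omega)]

-- on digits 0..15 the rendered digit is a single character, so reversing the
-- rendered string is rendering the reversed digit list
theorem pvDigB_singleton (d : Int) (h0 : 0 ≤ d) (h16 : d < 16) : ∃ c, pvDigB d = [c] := by
  have h1 : (pvDigB d).length = 1 := by interval_cases d <;> decide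
  exact List.length_eq_one_iff.mp h1

theorem flatMap_reverse_of_singleton (f : Int → List Char) :
    ∀ (l : List Int), (∀ d ∈ l, ∃ c, f d = [c]) →
      (l.flatMap f).reverse = l.reverse.flatMap f := by
  intro l
  induction l with
  | nil => intro _; rfl
  | cons x xs ih =>
    intro h
    obtain ⟨c, hc⟩ := h x (List.mem_cons_self)
    simp only [List.flatMap_cons, List.reverse_append, List.reverse_cons,
      List.flatMap_append, ih (fun d hd => h d (List.mem_cons_of_mem _ hd)), hc]
    simp

theorem flatMap_length_of_singleton (f : Int → List Char) :
    ∀ (l : List Int), (∀ d ∈ l, ∃ c, f d = [c]) → (l.flatMap f).length = l.length := by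
  intro l
  induction l with
  | nil => intro _; rfl
  | cons x xs ih =>
    intro h
    obtain ⟨c, hc⟩ := h x (List.mem_cons_self)
    simp [List.flatMap_cons, hc, ih (fun d hd => h d (List.mem_cons_of_mem _ hd))]

-- main loop correspondence; 'n ≤ 16 ∨ end_ ≤ 15' keeps every rendered digit below 16,
-- using the invariant idx ≤ current length
theorem pvLoop_eq (n end_ : Int) (h2 : 2 ≤ n) (hsafe : n ≤ 16 ∨ end_ ≤ 15) :
    ∀ (fuel : Nat) (text : List (List Char)) (idx : Int) (digits : List Int),
      1 ≤ idx → idx ≤ ((text.flatten.length : Nat) : Int) →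
      pvBump n digits = pvLsC n idx →
      pvLoopA n end_ fuel text.flatten idx =
        (pvLoopB n end_ fuel text ((text.flatten.length : Nat) : Int) digits).flatten := by
  intro fuel
  induction fuel with
  | zero => intro text idx digits _ _ _; simp [pvLoopA, pvLoopB]
  | succ f ih =>
    intro text idx digits hidx hinv hdig
    by_cases hcond : ((text.flatten.length : Nat) : Int) ≤ end_
    · have hsing : ∀ d ∈ pvLsC n idx, ∃ c, pvDigB d = [c] := by
        intro d hd
        by_cases hn16 : n ≤ 16
        · have := mem_pvLs n h2 _ idx d hd
          exact pvDigB_singleton d this.1 (by omega)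
        · have hend15 : end_ ≤ 15 := by tauto
          have hidx15 : idx ≤ 15 := by omega
          rw [pvLsC_single n idx h2 (by omega) (by omega)] at hd
          simp at hd
          exact pvDigB_singleton d (by omega) (by omega)
      have htmp : pvConvA n idx.toNat idx [] = (pvLsC n idx).flatMap pvDigB := by
        rw [pvConvA_eq]
        simp only [List.nil_append, pvLsC]
        rfl
      have hpiece : (pvConvA n idx.toNat idx []).reverse = pvRenderB (pvBump n digits) := by
        rw [htmp, hdig, pvRenderB, ← List.flatMap_def,
          flatMap_reverse_of_singleton pvDigB _ hsing]
      have hplen : (pvRenderB (pvBump n digits)).length = (pvLsC n idx).length := by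
        rw [pvRenderB, ← List.flatMap_def, hdig,
          flatMap_length_of_singleton pvDigB _ (by
            intro d hd; exact hsing d (List.mem_reverse.mp hd))]
        simp
      have hpge : 1 ≤ (pvRenderB (pvBump n digits)).length := by
        rw [hplen, pvLsC_pos n idx h2 (by omega)]
        simp
      simp only [pvLoopA, pvLoopB, if_pos hcond, hpiece]
      have hlen : ((text.flatten.length : Nat) : Int) + ((pvRenderB (pvBump n digits)).length : Int)
          = (((text ++ [pvRenderB (pvBump n digits)]).flatten.length : Nat) : Int) := by
        simp
      have hflat : text.flatten ++ pvRenderB (pvBump n digits)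
          = (text ++ [pvRenderB (pvBump n digits)]).flatten := by simp
      rw [hflat, hlen, ih (text ++ [pvRenderB (pvBump n digits)]) (idx + 1) (pvBump n digits)
        (by omega)
        (by rw [← hlen]; omega)
        (by rw [hdig]; exact pvBump_pvLsC n h2 idx.toNat idx (by omega) (by omega))]
    · simp only [pvLoopA, pvLoopB, if_neg hcond]

-- ===== VERDICT (by name: the statement is the Claim_ definition above) =====
theorem getNtext_spec : Claim_equal_getNtext := by
  intro n end_ _ hpre
  unfold Spec_getNtext getNtext getNtext_alt
  rcases hpre with ⟨h2, hsafe⟩ | hend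
  case inr =>
    -- end_ < 1: the loop condition fails at once in both programs
    cases hf : (end_ + 1).toNat with
    | zero => rfl
    | succ f =>
      have hcA : ¬(((['0'] : List Char).length : Nat) : Int) ≤ end_ := by
        simp only [List.length_singleton]; omega
      have hcB : ¬(1 : Int) ≤ end_ := by omega
      simp only [pvLoopA, pvLoopB, if_neg hcA, if_neg hcB]
      rfl
  have hbump : pvBump n [0] = pvLsC n 1 := by
    have hone : pvLsC n 1 = [1] := pvLsC_single n 1 h2 (by omega) (by omega)
    rw [hone]
    simp [pvBump]
    omega
  have h := pvLoop_eq n end_ h2 hsafe (end_ + 1).toNat [['0']] 1 [0] (by omega)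
    (by simp) hbump
  have e1 : ([['0']] : List (List Char)).flatten = ['0'] := by simp
  rw [e1] at h
  norm_num at h
  rw [h]
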